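-- pv_equiv track=rewrite | github.com/iitd-plos/superopt-tests | misc/c2bc.py | get_output_filename
-- ===== SOURCE A (Python) =====
-- def get_output_filename(args):
--   ret = "a.out"
--   next_is_output_filename = False
--   for a in args:
--     if next_is_output_filename:
--       ret = a
--     if a == "-o":
--       next_is_output_filename = True
--     else:
--       next_is_output_filename = False
--   return ret
-- ===== SOURCE B (Python) =====
-- def get_output_filename(args):
--     for i in range(len(args) - 2, -1, -1):
--         if args[i] == "-o":
--             return args[i + 1]
--     return "a.out"
-- ===== Notes on version B (the rewrite author's own statement) =====
-- stated objective: simpler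
-- what changed: Replaces the forward boolean state-machine that keeps overwriting a running result with a reverse index scan that returns immediately at the last '-o' with a successor.
import Mathlib
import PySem

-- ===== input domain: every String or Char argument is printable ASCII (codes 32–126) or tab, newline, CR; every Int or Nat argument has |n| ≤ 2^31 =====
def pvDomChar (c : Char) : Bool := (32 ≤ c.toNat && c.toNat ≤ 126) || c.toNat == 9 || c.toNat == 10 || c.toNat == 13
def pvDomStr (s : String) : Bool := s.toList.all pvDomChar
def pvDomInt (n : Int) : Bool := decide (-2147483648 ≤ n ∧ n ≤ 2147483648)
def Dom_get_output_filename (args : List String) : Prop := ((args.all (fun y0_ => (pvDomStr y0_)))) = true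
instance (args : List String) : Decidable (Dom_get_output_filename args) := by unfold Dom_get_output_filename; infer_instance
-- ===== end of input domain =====

-- B replaces A's forward boolean state-machine with a reverse index scan returning at the last "-o" with a successor (objective: simpler).

-- ===== PORT A =====
-- one loop step of A: update (ret, next_is_output_filename) with argument a
def pvStepA (s : String × Bool) (a : String) : String × Bool :=
  ((if s.2 then a else s.1), a == "-o")

def get_output_filename (args : List String) : String :=
  (args.foldl pvStepA ("a.out", false)).1

-- ===== PORT B =====
-- Source B's loop 'for i in range(len(args)-2, -1, -1)': fuel k+1 means current index is k-1+... i.e. bLoop checks index i at fuel i+1; indices i, i+1 are always in range, so getD is exact.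
def bLoop (args : List String) : Nat → String
  | 0 => "a.out"
  | (i + 1) => if args.getD i "" == "-o" then args.getD (i + 1) "" else bLoop args i

def get_output_filename_alt (args : List String) : String :=
  bLoop args (args.length - 1)

-- ===== PRECONDITION & SPEC =====
def Spec_get_output_filename (args : List String) (out : String) : Prop := out = get_output_filename_alt args
instance (args : List String) (out : String) : Decidable (Spec_get_output_filename args out) := by unfold Spec_get_output_filename; infer_instance

-- ===== CLAIM (what is proved, stated in full; the proofs are below) =====
def Claim_equal_get_output_filename : Prop := ∀ (args : List String), Dom_get_output_filename args → Spec_get_output_filename args (get_output_filename args)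

-- ===== LEMMAS AND PROOFS =====

-- A's flag after the loop is "last element equals -o"
theorem pv_snd_foldl (xs : List String) :
    (xs.foldl pvStepA ("a.out", false)).2 = (xs.getD (xs.length - 1) "" == "-o") := by
  induction xs using List.reverseRecOn with
  | nil => simp
  | append_singleton ys x ih =>
      simp [List.foldl_append, pvStepA]

-- bLoop only inspects indices ≤ its fuel, so appending past them does not matter
theorem pv_getD_append (xs : List String) (x : String) (i : Nat) (h : i < xs.length) :
    (xs ++ [x]).getD i "" = xs.getD i "" := by
  simp [List.getD, List.getElem?_append_left h]

theorem pv_bLoop_append (xs : List String) (x : String) :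
    ∀ k, k < xs.length → bLoop (xs ++ [x]) k = bLoop xs k := by
  intro k
  induction k with
  | zero => intro _; simp [bLoop]
  | succ i ih =>
      intro hk
      have hi : i < xs.length := Nat.lt_of_succ_lt hk
      simp only [bLoop, pv_getD_append _ _ _ hi, pv_getD_append _ _ _ hk]
      split
      · rfl
      · exact ih hi

theorem pv_main (xs : List String) :
    (xs.foldl pvStepA ("a.out", false)).1 = bLoop xs (xs.length - 1) := by
  induction xs using List.reverseRecOn with
  | nil => simp [bLoop]
  | append_singleton ys x ih =>
      rw [List.foldl_append]
      simp only [List.foldl_cons, List.foldl_nil]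
      rw [show pvStepA (ys.foldl pvStepA ("a.out", false)) x
            = ((if (ys.foldl pvStepA ("a.out", false)).2 then x
                else (ys.foldl pvStepA ("a.out", false)).1), x == "-o") from rfl]
      rw [pv_snd_foldl]
      cases ys with
      | nil => simp [bLoop]
      | cons y ys' =>
          have hlen : ((y :: ys') ++ [x]).length - 1 = (y :: ys').length - 1 + 1 := by
            simp
          rw [hlen]
          simp only [bLoop]
          have hk : (y :: ys').length - 1 < (y :: ys').length := by simp
          have h1 := pv_getD_append (y :: ys') x ((y :: ys').length - 1) hk
          have h2 : ((y :: ys') ++ [x]).getD ((y :: ys').length - 1 + 1) "" = x := by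
            have : (y :: ys').length - 1 + 1 = (y :: ys').length := by simp
            rw [this]
            simp [List.getD]
          rw [h1, h2, pv_bLoop_append _ _ _ hk]
          split
          · rfl
          · exact ih

-- ===== VERDICT (by name: the statement is the Claim_ definition above) =====
theorem get_output_filename_spec : Claim_equal_get_output_filename := by
  intro args _
  unfold Spec_get_output_filename get_output_filename get_output_filename_alt
  exact pv_main args
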